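-- pv_equiv track=rewrite | github.com/0SINTr/hARP | harp/initiator.py | convert_message_to_mac
-- ===== SOURCE A (Python) =====
-- MAC_ADDRESS_FORMAT = "{}:{}:{}:{}:{}:{}"
--
-- def convert_message_to_mac(message, mapping):
--     encoded = ''.join([mapping[char] for char in message])
--     # Each MAC address requires 12 hex characters (6 octets)
--     mac_addresses = []
--     for i in range(0, len(encoded), 12):
--         chunk = encoded[i:i+12]
--         if len(chunk) < 12:
--             chunk = chunk.ljust(12, '0')  # Pad with '0's
--         mac = MAC_ADDRESS_FORMAT.format(*[chunk[j:j+2] for j in range(0, 12, 2)])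
--         mac_addresses.append(mac)
--     return mac_addresses
-- ===== SOURCE B (Python) =====
-- def convert_message_to_mac(message, mapping):
--     encoded = ''.join(mapping[char] for char in message)
--     # pair consecutive characters into octets; a dangling last char is padded with '0'
--     it = iter(encoded)
--     octets = [a + next(it, '0') for a in it]
--     macs, group = [], []
--     for octet in octets:
--         group.append(octet)
--         if len(group) == 6:
--             macs.append(':'.join(group))
--             group = []
--     if group:
--         macs.append(':'.join(group + ['00'] * (6 - len(group))))
--     return macs
-- ===== Notes on version B (the rewrite author's own statement) =====
-- stated objective: alternative
-- what changed: A slices the encoded string in a stride-12 index loop, pads each final chunk to 12 chars and re-slices it into six pairs per MAC; B makes one pairing pass turning the stream into 2-char octets (padding a dangling char with '0') and then groups octets six at a time with an accumulator fold, flushing a '00'-filled last group.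
import Mathlib
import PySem

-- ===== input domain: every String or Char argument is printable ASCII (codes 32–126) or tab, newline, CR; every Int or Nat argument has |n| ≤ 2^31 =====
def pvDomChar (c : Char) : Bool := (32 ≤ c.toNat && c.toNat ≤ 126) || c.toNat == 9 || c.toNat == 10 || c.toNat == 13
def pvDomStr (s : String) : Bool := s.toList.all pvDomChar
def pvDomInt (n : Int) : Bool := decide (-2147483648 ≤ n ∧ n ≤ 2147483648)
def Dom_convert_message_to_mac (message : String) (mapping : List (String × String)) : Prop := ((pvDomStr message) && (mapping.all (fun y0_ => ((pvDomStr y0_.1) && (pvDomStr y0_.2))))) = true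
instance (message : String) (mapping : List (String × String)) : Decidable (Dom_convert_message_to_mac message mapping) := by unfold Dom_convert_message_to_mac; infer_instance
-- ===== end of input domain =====

-- B replaces A's stride-12 index loop over the encoded string by a single pairing pass into
-- 2-char octets followed by an accumulator fold grouping six octets per MAC (objective: alternative).

-- ===== PORT A =====
-- encoded = ''.join([mapping[char] for char in message]); mapping[char] raises KeyError on a
-- missing key — those inputs are excluded by Pre_ below, so getD's default is never reached.
-- String slicing is ported on .toList via PySem.List.slice (exact);
-- MAC_ADDRESS_FORMAT.format(*six 2-char slices) is their ':'-join.
def convert_message_to_mac (message : String) (mapping : List (String × String)) : List String :=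
  let d : PySem.Dict String String := PySem.Dict.mk mapping
  let encoded : List Char :=
    (PySem.Str.join "" (message.toList.map (fun ch => d.getD (String.ofList [ch]) ""))).toList
  (PySem.List.pyRange 0 (encoded.length : Int) 12).foldl
    (fun acc i =>
      let chunk := PySem.List.slice encoded (some i) (some (i + 12))
      let chunk := if chunk.length < 12 then chunk ++ List.replicate (12 - chunk.length) '0' else chunk
      acc ++ [String.ofList (PySem.Chars.join [':']
        ((PySem.List.pyRange 0 12 2).map (fun j => PySem.List.slice chunk (some j) (some (j + 2)))))])
    []

-- ===== PORT B =====
-- octets = [a + next(it, '0') for a in it]: consecutive pairs, dangling last char padded with '0'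
def pvPairOctets : List Char → List (List Char)
  | [] => []
  | [a] => [[a, '0']]
  | a :: b :: rest => [a, b] :: pvPairOctets rest

def convert_message_to_mac_alt (message : String) (mapping : List (String × String)) : List String :=
  let d : PySem.Dict String String := PySem.Dict.mk mapping
  let encoded : List Char :=
    (PySem.Str.join "" (message.toList.map (fun ch => d.getD (String.ofList [ch]) ""))).toList
  let octets := pvPairOctets encoded
  let st := octets.foldl
    (fun (st : List String × List (List Char)) o =>
      let group := st.2 ++ [o]
      if group.length = 6 then (st.1 ++ [String.ofList (PySem.Chars.join [':'] group)], [])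
      else (st.1, group))
    ([], [])
  if st.2 = [] then st.1
  else st.1 ++ [String.ofList (PySem.Chars.join [':'] (st.2 ++ List.replicate (6 - st.2.length) ['0', '0']))]

-- ===== PRECONDITION & SPEC =====
-- Pre_: every character of message is a key of mapping — exactly where Python's mapping[char]
-- does not raise KeyError.
def Pre_convert_message_to_mac (message : String) (mapping : List (String × String)) : Prop :=
  (message.toList.all (fun ch => mapping.any (fun p => p.1 == String.ofList [ch]))) = true
instance (message : String) (mapping : List (String × String)) : Decidable (Pre_convert_message_to_mac message mapping) := by unfold Pre_convert_message_to_mac; infer_instance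

def pvWitness_convert_message_to_mac : String × (List (String × String)) :=
  ("aba", [("a", "0f"), ("b", "4")])

def Spec_convert_message_to_mac (message : String) (mapping : List (String × String)) (out : List String) : Prop := out = convert_message_to_mac_alt message mapping
instance (message : String) (mapping : List (String × String)) (out : List String) : Decidable (Spec_convert_message_to_mac message mapping out) := by unfold Spec_convert_message_to_mac; infer_instance

-- ===== CLAIM (what is proved, stated in full; the proofs are below) =====
def Claim_equal_convert_message_to_mac : Prop := ∀ (message : String) (mapping : List (String × String)), Dom_convert_message_to_mac message mapping → Pre_convert_message_to_mac message mapping → Spec_convert_message_to_mac message mapping (convert_message_to_mac message mapping)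

-- ===== LEMMAS AND PROOFS =====

-- the encoded character stream both ports build
def pvEncode (message : String) (mapping : List (String × String)) : List Char :=
  (PySem.Str.join "" (message.toList.map
    (fun ch => (PySem.Dict.mk mapping).getD (String.ofList [ch]) ""))).toList

-- A's per-chunk MAC string (of a chunk already padded to 12 chars)
def pvMac12 (chunk : List Char) : String :=
  String.ofList (PySem.Chars.join [':']
    ((PySem.List.pyRange 0 12 2).map (fun j => PySem.List.slice chunk (some j) (some (j + 2)))))

-- pad a (≤ 12)-char chunk to 12 with '0'
def pvPad12 (c : List Char) : List Char := c ++ List.replicate (12 - c.length) '0'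

-- reference chunking of the octet list into groups of six
def pvGroups6 (os : List (List Char)) : List String :=
  if _h : os = [] then []
  else
    String.ofList (PySem.Chars.join [':'] (os.take 6 ++ List.replicate (6 - (os.take 6).length) ['0', '0']))
      :: pvGroups6 (os.drop 6)
termination_by os.length
decreasing_by
  simp only [List.length_drop]
  have := List.length_pos_of_ne_nil _h
  omega

theorem pvPairOctets_take : ∀ (k : Nat) (e : List Char),
    (pvPairOctets e).take k = pvPairOctets (e.take (2 * k))
  | 0, e => by simp [pvPairOctets]
  | k+1, [] => by simp [pvPairOctets]
  | k+1, [a] => by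
      have h2 : 2 * (k+1) = 2*k + 1 + 1 := by ring
      simp [pvPairOctets, h2]
  | k+1, a :: b :: rest => by
      have h2 : 2 * (k+1) = 2*k + 1 + 1 := by ring
      rw [h2]
      simp only [pvPairOctets, List.take_succ_cons]
      rw [pvPairOctets_take k rest]

theorem pvPairOctets_drop : ∀ (k : Nat) (e : List Char),
    (pvPairOctets e).drop k = pvPairOctets (e.drop (2 * k))
  | 0, e => by simp
  | k+1, [] => by simp [pvPairOctets]
  | k+1, [a] => by
      have h2 : 2 * (k+1) = 2*k + 1 + 1 := by ring
      simp [pvPairOctets, h2]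
  | k+1, a :: b :: rest => by
      have h2 : 2 * (k+1) = 2*k + 1 + 1 := by ring
      rw [h2]
      simp only [pvPairOctets, List.drop_succ_cons]
      rw [pvPairOctets_drop k rest]

theorem pvPairOctets_ne_nil : ∀ (e : List Char), e ≠ [] → pvPairOctets e ≠ []
  | [], h => absurd rfl h
  | [_], _ => by simp [pvPairOctets]
  | _ :: _ :: _, _ => by simp [pvPairOctets]

theorem pvPairOctets_replicate : ∀ (n : Nat),
    pvPairOctets (List.replicate (2 * n) '0') = List.replicate n ['0', '0']
  | 0 => rfl
  | n+1 => by
      have h2 : 2 * (n+1) = 2*n + 1 + 1 := by ring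
      rw [h2, List.replicate_succ, List.replicate_succ, List.replicate_succ]
      simp only [pvPairOctets]
      rw [pvPairOctets_replicate n]

-- padding the chunk before pairing = pairing then padding with '00' octets
theorem pvPairOctets_pad : ∀ (n : Nat) (e : List Char), e.length ≤ 2 * n →
    pvPairOctets (e ++ List.replicate (2 * n - e.length) '0') =
      pvPairOctets e ++ List.replicate (n - (pvPairOctets e).length) ['0', '0']
  | n, [], _ => by simp [pvPairOctets, pvPairOctets_replicate n]
  | n, [a], h => by
      obtain ⟨m, rfl⟩ : ∃ m, n = m + 1 := ⟨n - 1, by simp at h; omega⟩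
      have h2 : 2 * (m+1) - [a].length = 2*m + 1 := by simp; omega
      rw [h2, List.replicate_succ]
      show pvPairOctets (a :: '0' :: List.replicate (2*m) '0') = _
      simp only [pvPairOctets, pvPairOctets_replicate m]
      simp
  | n, a :: b :: rest, h => by
      obtain ⟨m, rfl⟩ : ∃ m, n = m + 1 := ⟨n - 1, by simp at h; omega⟩
      have hr : rest.length ≤ 2 * m := by simp at h; omega
      have h2 : 2 * (m+1) - (a :: b :: rest).length = 2*m - rest.length := by simp; omega
      rw [h2]
      show pvPairOctets (a :: b :: (rest ++ List.replicate (2*m - rest.length) '0')) = _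
      simp only [pvPairOctets, pvPairOctets_pad m rest hr]
      simp only [List.length_cons, List.cons_append]
      have h3 : m + 1 - (pvPairOctets rest).length.succ = m - (pvPairOctets rest).length := by omega
      simp [h3]

-- xs[2k : 2k+2] written with the Int arithmetic A's loop produces
theorem pvSlice2 (xs : List Char) (k : Nat) :
    PySem.List.slice xs (some (2 * (k : Int))) (some (2 * (k : Int) + 2)) =
      (xs.drop (2 * k)).take 2 := by
  have h := PySem.List.slice_natCast_add xs (2 * k) 2
  have e2 : ((2 * k : Nat) : Int) + ((2 : Nat) : Int) = 2 * (k : Int) + 2 := by push_cast; ring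
  have e1 : ((2 * k : Nat) : Int) = 2 * (k : Int) := by push_cast; ring
  rw [e2, e1] at h
  exact h

theorem pvSlice12 (xs : List Char) (k : Nat) :
    PySem.List.slice xs (some (0 + 12 * (k : Int))) (some (0 + 12 * (k : Int) + 12)) =
      (xs.drop (12 * k)).take 12 := by
  have h := PySem.List.slice_natCast_add xs (12 * k) 12
  have e2 : ((12 * k : Nat) : Int) + ((12 : Nat) : Int) = 0 + 12 * (k : Int) + 12 := by push_cast; ring
  have e1 : ((12 * k : Nat) : Int) = 0 + 12 * (k : Int) := by push_cast; ring
  rw [e2, e1] at h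
  exact h

-- the six 2-char slices of a (2m)-char chunk are its consecutive pairs
theorem pvPairs_of_range : ∀ (m : Nat) (chunk : List Char), chunk.length = 2 * m →
    (List.range m).map (fun k => (chunk.drop (2 * k)).take 2) = pvPairOctets chunk
  | 0, chunk, h => by
      have hc : chunk = [] := List.eq_nil_of_length_eq_zero (by omega)
      subst hc
      simp [pvPairOctets]
  | m+1, [], h => by simp at h
  | m+1, [a], h => by simp at h; omega
  | m+1, a :: b :: rest, h => by
      have hr : rest.length = 2 * m := by simp at h; omega
      rw [List.range_succ_eq_map, List.map_cons, List.map_map]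
      simp only [pvPairOctets]
      congr 1
      have : ∀ k : Nat, ((fun k => ((a :: b :: rest).drop (2 * k)).take 2) ∘ Nat.succ) k =
          (fun k => (rest.drop (2 * k)).take 2) k := by
        intro k
        have h2 : 2 * Nat.succ k = 2 * k + 1 + 1 := by omega
        simp only [Function.comp_apply, h2, List.drop_succ_cons]
      rw [funext this, pvPairs_of_range m rest hr]

theorem pvMac12_eq (chunk : List Char) (h : chunk.length = 12) :
    pvMac12 chunk = String.ofList (PySem.Chars.join [':'] (pvPairOctets chunk)) := by
  unfold pvMac12
  apply congrArg (fun l => String.ofList (PySem.Chars.join [':'] l))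
  rw [PySem.List.pyRange_of_pos 0 12 (by norm_num : (0:Int) < 2)]
  norm_num
  rw [show Int.toNat 6 = 6 from rfl]
  have : ∀ k : Nat, ((fun j => PySem.List.slice chunk (some j) (some (j + 2))) ∘ (fun k : Nat => 2 * (k : Int))) k
      = (fun k => (chunk.drop (2 * k)).take 2) k := by
    intro k
    simp only [Function.comp_apply]
    exact pvSlice2 chunk k
  rw [funext this, pvPairs_of_range 6 chunk (by omega)]

-- A's loop = a map over the chunk starts
theorem pvLoopA_eq (e : List Char) :
    (PySem.List.pyRange 0 (e.length : Int) 12).foldl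
      (fun acc i =>
        let chunk := PySem.List.slice e (some i) (some (i + 12))
        let chunk := if chunk.length < 12 then chunk ++ List.replicate (12 - chunk.length) '0' else chunk
        acc ++ [String.ofList (PySem.Chars.join [':']
          ((PySem.List.pyRange 0 12 2).map (fun j => PySem.List.slice chunk (some j) (some (j + 2)))))])
      [] =
    (List.range ((e.length + 11) / 12)).map (fun k => pvMac12 (pvPad12 ((e.drop (12 * k)).take 12))) := by
  rw [PySem.List.pyRange_of_pos 0 ((e.length : Nat) : Int) (by norm_num : (0:Int) < 12)]
  have hM : (if (0:Int) < (e.length : Int) then (((e.length : Int) - 0 + 12 - 1) / 12).toNat else 0)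
      = (e.length + 11) / 12 := by split_ifs with h <;> omega
  rw [hM, List.foldl_map]
  simp only
  rw [PySem.List.foldl_append_singleton_eq_map, List.nil_append]
  apply List.map_congr_left
  intro k _
  rw [pvSlice12 e k]
  have hlen : ((e.drop (12 * k)).take 12).length ≤ 12 := by
    simp [List.length_take]
  split_ifs with hlt
  · rfl
  · have h12 : ((e.drop (12 * k)).take 12).length = 12 := by omega
    simp [pvMac12, pvPad12, h12]

theorem pvMain (e : List Char) :
    (List.range ((e.length + 11) / 12)).map (fun k => pvMac12 (pvPad12 ((e.drop (12 * k)).take 12))) =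
      pvGroups6 (pvPairOctets e) := by
  by_cases he : e = []
  · subst he
    rw [pvGroups6]
    simp [pvPairOctets]
  · have hlen : 0 < e.length := List.length_pos_of_ne_nil he
    have hm : (e.length + 11) / 12 = ((e.drop 12).length + 11) / 12 + 1 := by
      simp only [List.length_drop]; omega
    rw [hm, List.range_succ_eq_map, List.map_cons, List.map_map]
    rw [pvGroups6, dif_neg (pvPairOctets_ne_nil e he)]
    have htk : (pvPairOctets e).take 6 = pvPairOctets (e.take 12) := by
      have := pvPairOctets_take 6 e; norm_num at this; exact this
    have hdr : (pvPairOctets e).drop 6 = pvPairOctets (e.drop 12) := by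
      have := pvPairOctets_drop 6 e; norm_num at this; exact this
    congr 1
    · -- head
      have hpadlen : (pvPad12 (e.take 12)).length = 12 := by
        simp only [pvPad12, List.length_append, List.length_replicate, List.length_take]
        omega
      rw [Nat.mul_zero, List.drop_zero, pvMac12_eq (pvPad12 (e.take 12)) hpadlen]
      apply congrArg (fun l => String.ofList (PySem.Chars.join [':'] l))
      have hp := pvPairOctets_pad 6 (e.take 12) (by simp)
      have hpad : pvPad12 (e.take 12) =
          e.take 12 ++ List.replicate (2 * 6 - (e.take 12).length) '0' := by
        norm_num [pvPad12]
      rw [htk, hpad, hp]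
    · -- tail
      have : ∀ k : Nat, ((fun k => pvMac12 (pvPad12 ((e.drop (12 * k)).take 12))) ∘ Nat.succ) k =
          (fun k => pvMac12 (pvPad12 (((e.drop 12).drop (12 * k)).take 12))) k := by
        intro k
        simp only [Function.comp_apply, List.drop_drop]
        have : 12 * Nat.succ k = 12 + 12 * k := by omega
        rw [this]
      rw [funext this, pvMain (e.drop 12), hdr]
termination_by e.length
decreasing_by simp only [List.length_drop]; omega

-- B's grouping fold with its final flush computes pvGroups6
theorem pvFoldB : ∀ (os : List (List Char)) (macs : List String) (group : List (List Char)),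
    group.length < 6 →
    (let st := os.foldl
        (fun (st : List String × List (List Char)) o =>
          let group := st.2 ++ [o]
          if group.length = 6 then (st.1 ++ [String.ofList (PySem.Chars.join [':'] group)], [])
          else (st.1, group))
        (macs, group);
     if st.2 = [] then st.1
     else st.1 ++ [String.ofList (PySem.Chars.join [':'] (st.2 ++ List.replicate (6 - st.2.length) ['0', '0']))]) =
    macs ++ pvGroups6 (group ++ os)
  | [], macs, group, hg => by
      simp only [List.foldl_nil, List.append_nil]
      by_cases h : group = []
      · subst h; rw [pvGroups6]; simp
      · rw [if_neg h]
        conv_rhs => rw [pvGroups6]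
        rw [dif_neg h, List.take_of_length_le (Nat.le_of_lt hg),
          List.drop_eq_nil_of_le (Nat.le_of_lt hg)]
        conv_rhs => rw [pvGroups6]
        simp
  | o :: rest, macs, group, hg => by
      simp only [List.foldl_cons]
      by_cases h6 : (group ++ [o]).length = 6
      · simp only [if_pos h6]
        rw [pvFoldB rest (macs ++ [String.ofList (PySem.Chars.join [':'] (group ++ [o]))]) [] (by norm_num)]
        rw [List.nil_append, List.append_assoc]
        congr 1
        have hne : group ++ [o] ++ rest ≠ [] := by simp
        rw [show group ++ o :: rest = (group ++ [o]) ++ rest by simp]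
        conv_rhs => rw [pvGroups6]
        rw [dif_neg hne, List.take_left' h6, List.drop_left' h6, h6]
        simp
      · simp only [if_neg h6]
        rw [pvFoldB rest macs (group ++ [o]) (by simp at h6 ⊢; omega)]
        simp

-- ===== VERDICT (by name: the statement is the Claim_ definition above) =====
theorem convert_message_to_mac_spec : Claim_equal_convert_message_to_mac := by
  intro message mapping _ _
  unfold Spec_convert_message_to_mac convert_message_to_mac convert_message_to_mac_alt
  simp only
  rw [pvLoopA_eq, pvMain]
  have := pvFoldB (pvPairOctets (pvEncode message mapping)) [] [] (by norm_num)
  simp only [List.nil_append] at this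
  unfold pvEncode at this
  exact this.symm
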